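-- pv_equiv track=rewrite | github.com/amazon-science/buggy-code-completion | src/utils/helpers.py | truncate_str_all
-- ===== SOURCE A (Python) =====
-- def truncate_str_all(orig_text, new_text):
--     truncate_before_pattern=["\n\n\n", r"\n\n^#",  '\n\ndef', "^'''",  "<|endoftext|>", "</", "\nfrom "]
--     min_idx = 10000
--     gen_text = new_text[len(orig_text):]
--     for s in truncate_before_pattern:
--         if s in gen_text:
--             idx = gen_text.find(s)
--             if idx > -1 and min_idx > idx:
--                 min_idx = idx
--     if min_idx < 10000:
--         return new_text[:len(orig_text)] + gen_text[:min_idx]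
--     return  new_text
-- ===== SOURCE B (Python) =====
-- import re
--
-- _STOP_RE = re.compile('|'.join(re.escape(p) for p in
--     ["\n\n\n", r"\n\n^#", '\n\ndef', "^'''", "<|endoftext|>", "</", "\nfrom "]))
--
--
-- def truncate_str_all(orig_text, new_text):
--     gen_text = new_text[len(orig_text):]
--     m = _STOP_RE.search(gen_text)
--     if m and m.start() < 10000:
--         return new_text[:len(orig_text)] + gen_text[:m.start()]
--     return new_text
-- ===== Notes on version B (the rewrite author's own statement) =====
-- stated objective: idiomatic
-- what changed: Replaced the seven per-pattern substring scans with a min-tracking loop by a single compiled regex (an escaped alternation of the seven literal patterns) searched once over the generated suffix; the leftmost match start replaces the minimum of the seven find indices.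
import Mathlib
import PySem

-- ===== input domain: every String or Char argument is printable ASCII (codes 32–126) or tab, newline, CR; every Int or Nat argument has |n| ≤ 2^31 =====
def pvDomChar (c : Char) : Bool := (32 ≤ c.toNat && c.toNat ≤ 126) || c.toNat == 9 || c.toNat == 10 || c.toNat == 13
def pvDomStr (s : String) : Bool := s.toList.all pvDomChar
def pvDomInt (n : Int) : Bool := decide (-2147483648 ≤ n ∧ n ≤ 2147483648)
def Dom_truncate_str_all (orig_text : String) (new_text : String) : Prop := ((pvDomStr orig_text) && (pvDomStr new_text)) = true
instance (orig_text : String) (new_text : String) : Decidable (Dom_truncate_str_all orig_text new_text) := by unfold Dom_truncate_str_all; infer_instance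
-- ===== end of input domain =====

-- B replaces A's seven per-pattern substring scans plus min-tracking loop by one
-- leftmost-match search of the (escaped) alternation of the seven literal patterns.

-- ===== PORT A =====
-- A's literal stop patterns (the 2nd and 4th contain LITERAL backslashes / '^').
def truncate_str_all (orig_text : String) (new_text : String) : String :=
  let truncate_before_pattern : List (List Char) :=
    [['\n','\n','\n'], ['\\','n','\\','n','^','#'], ['\n','\n','d','e','f'],
     ['^','\'','\'','\''], "<|endoftext|>".toList, ['<','/'], ['\n','f','r','o','m',' ']]
  let gen_text : List Char :=
    PySem.List.slice new_text.toList (some (PySem.Str.len orig_text)) none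
  let min_idx : Int := truncate_before_pattern.foldl (fun min_idx s =>
    if PySem.Chars.isIn s gen_text then
      let idx := PySem.Chars.find gen_text s
      if idx > -1 ∧ min_idx > idx then idx else min_idx
    else min_idx) 10000
  if min_idx < 10000 then
    String.ofList (PySem.List.slice new_text.toList none (some (PySem.Str.len orig_text)) ++
      PySem.List.slice gen_text none (some min_idx))
  else new_text

-- ===== PORT B =====
def pvStopPats : List (List Char) :=
  [['\n','\n','\n'], ['\\','n','\\','n','^','#'], ['\n','\n','d','e','f'],
   ['^','\'','\'','\''], "<|endoftext|>".toList, ['<','/'], ['\n','f','r','o','m',' ']]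

-- re.search of an escaped alternation of literal patterns = the first position at which
-- some pattern is a prefix of the remaining text (none ↔ no match); exact for literal
-- (escaped) alternatives, which is all Source B's compiled regex contains.
def pvSearch (pats : List (List Char)) : List Char → Option Nat
  | [] => if pats.any (·.isPrefixOf ([] : List Char)) then some 0 else none
  | c :: rest =>
    if pats.any (·.isPrefixOf (c :: rest)) then some 0
    else (pvSearch pats rest).map (· + 1)

def truncate_str_all_alt (orig_text : String) (new_text : String) : String :=
  let gen_text : List Char :=
    PySem.List.slice new_text.toList (some (PySem.Str.len orig_text)) none
  match pvSearch pvStopPats gen_text with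
  | some k =>
    if (k : Int) < 10000 then
      String.ofList (PySem.List.slice new_text.toList none (some (PySem.Str.len orig_text)) ++
        PySem.List.slice gen_text none (some (k : Int)))
    else new_text
  | none => new_text

-- ===== PRECONDITION & SPEC =====
def Spec_truncate_str_all (orig_text : String) (new_text : String) (out : String) : Prop := out = truncate_str_all_alt orig_text new_text
instance (orig_text : String) (new_text : String) (out : String) : Decidable (Spec_truncate_str_all orig_text new_text out) := by unfold Spec_truncate_str_all; infer_instance

-- ===== CLAIM (what is proved, stated in full; the proofs are below) =====
def Claim_equal_truncate_str_all : Prop := ∀ (orig_text : String) (new_text : String), Dom_truncate_str_all orig_text new_text → Spec_truncate_str_all orig_text new_text (truncate_str_all orig_text new_text)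

-- ===== LEMMAS AND PROOFS =====

-- g.find(p) as an Option Nat (none ↔ no occurrence)
def pvFindO (p g : List Char) : Option Nat :=
  if PySem.Chars.find g p = -1 then none else some (PySem.Chars.find g p).toNat

-- min on Option Nat, none = +∞
def pvOmin : Option Nat → Option Nat → Option Nat
  | none, b => b
  | a, none => a
  | some x, some y => some (min x y)

-- the minimum of the find-indices over the pattern list
def pvBest (pats : List (List Char)) (g : List Char) : Option Nat :=
  pats.foldr (fun p acc => pvOmin (pvFindO p g) acc) none

theorem pvFind_eq_of (p g : List Char) (m : Nat) (_hm : m ≤ g.length)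
    (h1 : p <+: g.drop m) (h2 : ∀ i < m, ¬ p <+: g.drop i) :
    PySem.Chars.find g p = (m : Int) := by
  have hin : PySem.Chars.isIn p g = true :=
    (PySem.Chars.exists_prefix_drop_iff_isIn _ _).mp ⟨m, h1⟩
  have hpos : 0 ≤ PySem.Chars.find g p :=
    (PySem.Chars.find_nonneg_iff _ _).mpr ((PySem.Chars.isIn_iff_infix _ _).mp hin)
  obtain ⟨hpre, hmin⟩ := PySem.Chars.find_spec hpos
  rcases lt_trichotomy (PySem.Chars.find g p).toNat m with h | h | h
  · exact absurd hpre (h2 _ h)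
  · omega
  · exact absurd h1 (hmin m h)

theorem pvFindO_nil (p : List Char) :
    pvFindO p [] = if p.isPrefixOf ([] : List Char) then some 0 else none := by
  by_cases hp : p = []
  · subst hp
    simp [pvFindO, PySem.Chars.find_nil, List.isPrefixOf]
  · have hfind : PySem.Chars.find [] p = -1 :=
      (PySem.Chars.find_eq_neg_one_iff _ _).mpr (by simpa [List.infix_nil] using hp)
    have hnp : ¬ p <+: ([] : List Char) := by simpa [List.prefix_nil] using hp
    simp [pvFindO, hfind, List.isPrefixOf_iff_prefix, hnp]

theorem pvFindO_cons (p : List Char) (c : Char) (g : List Char) :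
    pvFindO p (c :: g) =
      if p.isPrefixOf (c :: g) then some 0 else (pvFindO p g).map (· + 1) := by
  by_cases hpre : p <+: (c :: g)
  · have h0 : PySem.Chars.find (c :: g) p = ((0 : Nat) : Int) :=
      pvFind_eq_of p (c :: g) 0 (by omega) (by simpa using hpre)
        (fun i hi => absurd hi (Nat.not_lt_zero i))
    simp [pvFindO, h0, List.isPrefixOf_iff_prefix, hpre]
  · rw [if_neg (by simpa [List.isPrefixOf_iff_prefix] using hpre)]
    cases hfg : pvFindO p g with
    | none =>
      have hg : ¬ p <:+: g := by
        by_cases h : PySem.Chars.find g p = -1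
        · exact (PySem.Chars.find_eq_neg_one_iff _ _).mp h
        · simp [pvFindO, h] at hfg
      have hcg : PySem.Chars.find (c :: g) p = -1 := by
        apply (PySem.Chars.find_eq_neg_one_iff _ _).mpr
        intro hinf
        rcases List.infix_cons_iff.mp hinf with h | h
        · exact hpre h
        · exact hg h
      simp [pvFindO, hcg]
    | some k =>
      have hne : PySem.Chars.find g p ≠ -1 := by
        intro h; simp [pvFindO, h] at hfg
      have hkk : (PySem.Chars.find g p).toNat = k := by
        simpa [pvFindO, hne] using hfg
      have hpos : 0 ≤ PySem.Chars.find g p := by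
        have := PySem.Chars.neg_one_le_find g p; omega
      obtain ⟨hpre', hmin⟩ := PySem.Chars.find_spec hpos
      have hlen : (PySem.Chars.find g p) ≤ (g.length : Int) :=
        PySem.Chars.find_le_length g p
      have h1 : p <+: (c :: g).drop (k + 1) := by simpa [hkk] using hpre'
      have h2 : ∀ i < k + 1, ¬ p <+: (c :: g).drop i := by
        intro i hi
        cases i with
        | zero => simpa using hpre
        | succ j =>
          have hj : j < (PySem.Chars.find g p).toNat := by omega
          simpa using hmin j hj
      have hres : PySem.Chars.find (c :: g) p = ((k + 1 : Nat) : Int) :=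
        pvFind_eq_of p (c :: g) (k + 1) (by simp; omega) h1 h2
      simp [pvFindO, hres]
      omega

theorem pvOmin_some_zero_left (b : Option Nat) : pvOmin (some 0) b = some 0 := by
  cases b <;> simp [pvOmin]

theorem pvOmin_some_zero_right (a : Option Nat) : pvOmin a (some 0) = some 0 := by
  cases a <;> simp [pvOmin]

theorem pvOmin_map_succ (a b : Option Nat) :
    pvOmin (a.map (· + 1)) (b.map (· + 1)) = (pvOmin a b).map (· + 1) := by
  cases a <;> cases b <;> simp [pvOmin]

theorem pvBest_eq_pvSearch (g : List Char) :
    ∀ pats, pvBest pats g = pvSearch pats g := by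
  induction g with
  | nil =>
    intro pats
    induction pats with
    | nil => simp [pvBest, pvSearch]
    | cons p ps ih =>
      have step : pvBest (p :: ps) [] = pvOmin (pvFindO p []) (pvBest ps []) := rfl
      rw [step, pvFindO_nil, ih]
      by_cases hp : p.isPrefixOf ([] : List Char) <;>
        by_cases hps : ps.any (·.isPrefixOf ([] : List Char)) <;>
          simp [pvSearch, pvOmin, hp, hps]
  | cons c g ihg =>
    intro pats
    have key : ∀ qs : List (List Char),
        pvBest qs (c :: g) =
          if qs.any (·.isPrefixOf (c :: g)) then some 0
          else (pvBest qs g).map (· + 1) := by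
      intro qs
      induction qs with
      | nil => simp [pvBest]
      | cons p ps ih =>
        have step : pvBest (p :: ps) (c :: g) = pvOmin (pvFindO p (c :: g)) (pvBest ps (c :: g)) := rfl
        rw [step, pvFindO_cons, ih]
        by_cases hp : p.isPrefixOf (c :: g)
        · simp [hp, pvOmin_some_zero_left]
        · by_cases hps : ps.any (·.isPrefixOf (c :: g))
          · simp [hp, hps, pvOmin_some_zero_right]
          · have hb : pvBest (p :: ps) g = pvOmin (pvFindO p g) (pvBest ps g) := rfl
            simp [hp, hps, pvOmin_map_succ, hb]
    rw [key pats, ihg pats]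
    rfl

theorem truncate_str_all_fold (g : List Char) :
    ∀ (pats : List (List Char)) (m : Int), 0 ≤ m →
      pats.foldl (fun min_idx s =>
        if PySem.Chars.isIn s g then
          let idx := PySem.Chars.find g s
          if idx > -1 ∧ min_idx > idx then idx else min_idx
        else min_idx) m =
      (match pvBest pats g with
       | none => m
       | some k => min m (k : Int)) := by
  intro pats
  induction pats with
  | nil => intro m _; simp [pvBest]
  | cons p ps ih =>
    intro m hm
    have hb : pvBest (p :: ps) g = pvOmin (pvFindO p g) (pvBest ps g) := rfl
    rw [List.foldl_cons, hb]
    by_cases h : PySem.Chars.isIn p g = true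
    · have hpos : 0 ≤ PySem.Chars.find g p :=
        (PySem.Chars.find_nonneg_iff _ _).mpr ((PySem.Chars.isIn_iff_infix _ _).mp h)
      have hne : PySem.Chars.find g p ≠ -1 := by omega
      have hfO : pvFindO p g = some (PySem.Chars.find g p).toNat := by
        simp [pvFindO, hne]
      have hstep : (if PySem.Chars.isIn p g then
          let idx := PySem.Chars.find g p
          if idx > -1 ∧ m > idx then idx else m
        else m) = min m (PySem.Chars.find g p) := by
        rw [if_pos h]
        show (if PySem.Chars.find g p > -1 ∧ m > PySem.Chars.find g p
              then PySem.Chars.find g p else m) = min m (PySem.Chars.find g p)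
        split_ifs with h2
        · exact (min_eq_right h2.2.le).symm
        · have hle : m ≤ PySem.Chars.find g p := by
            by_contra hc
            exact h2 ⟨by omega, by omega⟩
          exact (min_eq_left hle).symm
      rw [hstep, ih (min m (PySem.Chars.find g p)) (le_min hm hpos), hfO]
      clear hstep hfO hne h
      generalize hq : PySem.Chars.find g p = q at hpos ⊢
      cases hbs : pvBest ps g with
      | none =>
        simp only [pvOmin]
        rw [Int.toNat_of_nonneg hpos]
      | some k =>
        simp only [pvOmin, Nat.cast_min, Int.toNat_of_nonneg hpos]
        rw [min_assoc]
    · have hfalse : PySem.Chars.isIn p g = false := by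
        cases hh : PySem.Chars.isIn p g
        · rfl
        · exact absurd hh h
      have hfind : PySem.Chars.find g p = -1 :=
        (PySem.Chars.find_eq_neg_one_iff _ _).mpr ((PySem.Chars.isIn_eq_false_iff _ _).mp hfalse)
      have hfO : pvFindO p g = none := by simp [pvFindO, hfind]
      rw [hfO]
      simp only [hfalse, Bool.false_eq_true, if_false]
      exact ih m hm

-- ===== VERDICT (by name: the statement is the Claim_ definition above) =====
theorem truncate_str_all_spec : Claim_equal_truncate_str_all := by
  intro orig_text new_text _
  unfold Spec_truncate_str_all truncate_str_all truncate_str_all_alt pvStopPats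
  simp only []
  set pats : List (List Char) :=
    [['\n','\n','\n'], ['\\','n','\\','n','^','#'], ['\n','\n','d','e','f'],
     ['^','\'','\'','\''], "<|endoftext|>".toList, ['<','/'], ['\n','f','r','o','m',' ']] with hpats
  set g : List Char :=
    PySem.List.slice new_text.toList (some (PySem.Str.len orig_text)) none with hg
  rw [truncate_str_all_fold g pats 10000 (by norm_num), pvBest_eq_pvSearch g pats]
  cases hs : pvSearch pats g with
  | none => simp
  | some k =>
    by_cases hk : (k : Int) < 10000
    · have hmin : min (10000 : Int) (k : Int) = (k : Int) := min_eq_right hk.le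
      simp [hmin, hk]
    · have hmin : min (10000 : Int) (k : Int) = 10000 := min_eq_left (not_lt.mp hk)
      simp [hmin, hk]
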